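-- pv_equiv track=rewrite | github.com/BartoszO-123/podstawy-programowania | Fn/28.py | f
-- ===== SOURCE A (Python) =====
-- from collections import Counter #
--
-- def f(number):
--     s_number = str(number)
--
--     counts = Counter(s_number)
--
--     total_sum = 0
--
--     for digit_char, count in counts.items():
--         if count > 1:
--             digit_int = int(digit_char)
--
--             total_sum += digit_int * count
--
--     return total_sum
-- ===== SOURCE B (Python) =====
-- def f(number):
--     s = sorted(str(number))
--     total = 0
--     i = 0
--     n = len(s)
--     while i < n:
--         j = i + 1
--         while j < n and s[j] == s[i]:
--             j += 1
--         run = j - i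
--         if run > 1:
--             total += int(s[i]) * run
--         i = j
--     return total
-- ===== Notes on version B (the rewrite author's own statement) =====
-- stated objective: alternative
-- what changed: Replaces Counter-based hash counting with sort-then-scan: sort the digit string and walk consecutive equal runs with two indices, adding int(char)*run_length for runs longer than 1.
import Mathlib
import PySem

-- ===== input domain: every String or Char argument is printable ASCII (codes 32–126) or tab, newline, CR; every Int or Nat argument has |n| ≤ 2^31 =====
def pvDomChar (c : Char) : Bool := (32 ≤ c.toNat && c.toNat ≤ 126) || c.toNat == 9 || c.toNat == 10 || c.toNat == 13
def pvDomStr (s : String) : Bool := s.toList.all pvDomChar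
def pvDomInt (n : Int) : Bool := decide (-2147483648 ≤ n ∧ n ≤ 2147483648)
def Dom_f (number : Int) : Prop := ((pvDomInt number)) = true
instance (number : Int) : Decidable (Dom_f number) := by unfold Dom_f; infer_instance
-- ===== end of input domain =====

-- B replaces Counter-based hash counting with sort-then-scan over runs of equal characters (alternative decomposition, same result).

-- ===== PORT A =====
-- int(digit_char) is reached only when count > 1; a character that repeats in str(n)
-- is always a digit ('-' occurs at most once), so ofChars? is some there; getD 0 is its total form.
def f (number : Int) : Int :=
  let sNumber := PySem.Int.toChars number
  let counts := PySem.Dict.counter sNumber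
  counts.items.foldl
    (fun totalSum p =>
      if p.2 > 1 then totalSum + (PySem.Int.ofChars? [p.1]).getD 0 * p.2 else totalSum)
    0

-- ===== PORT B =====
-- the outer while loop of Source B: each step consumes one run of equal characters of the sorted list
def runSum : List Char → Int
  | [] => 0
  | c :: rest =>
    let k := (rest.takeWhile (fun d => d == c)).length
    let run : Int := 1 + k
    (if run > 1 then (PySem.Int.ofChars? [c]).getD 0 * run else 0)
      + runSum (rest.dropWhile (fun d => d == c))
termination_by l => l.length
decreasing_by
  have h := (rest.dropWhile_sublist (p := fun d => d == c)).length_le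
  simp; omega

def f_alt (number : Int) : Int :=
  runSum (PySem.List.sorted (PySem.Int.toChars number) (fun c => c) false)

-- ===== PRECONDITION & SPEC =====
def Spec_f (number : Int) (out : Int) : Prop := out = f_alt number
instance (number : Int) (out : Int) : Decidable (Spec_f number out) := by unfold Spec_f; infer_instance

-- ===== CLAIM (what is proved, stated in full; the proofs are below) =====
def Claim_equal_f : Prop := ∀ (number : Int), Dom_f number → Spec_f number (f number)

-- ===== LEMMAS AND PROOFS =====

-- the per-character contribution: int(c)*n when n > 1, else 0
def contrib (c : Char) (n : Int) : Int :=
  if 1 < n then (PySem.Int.ofChars? [c]).getD 0 * n else 0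

-- A's Counter loop is the sum of contributions over the distinct characters of str(number)
lemma f_eq_sum (number : Int) :
    f number = ((PySem.Set.ofList (PySem.Int.toChars number)).map
      (fun c => contrib c ((PySem.Int.toChars number).count c))).sum := by
  unfold f
  simp only [PySem.Dict.items_counter, List.foldl_map]
  have hstep : (fun (x : Int) (y : Char) =>
      if ((PySem.Int.toChars number).count y : Int) > 1 then
        x + (PySem.Int.ofChars? [y]).getD 0 * ((PySem.Int.toChars number).count y : Int)
      else x)
      = fun x y => x + contrib y ((PySem.Int.toChars number).count y) := by
    funext x y
    simp only [contrib, gt_iff_lt]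
    split_ifs <;> simp
  rw [hstep, PySem.List.foldl_add]
  simp

-- B's run scan over a sorted list is the same sum of contributions over its distinct characters
lemma runSum_eq_sum (l : List Char) (h : l.Pairwise (· ≤ ·)) :
    runSum l = ((PySem.Set.ofList l).map (fun c => contrib c (l.count c))).sum := by
  induction l using runSum.induct with
  | case1 => simp [runSum, PySem.Set.ofList_nil]
  | case2 c rest ih =>
    rw [runSum]
    set t := rest.takeWhile (fun d => d == c) with htdef
    set tail := rest.dropWhile (fun d => d == c) with htaildef
    have hsplit : t ++ tail = rest := List.takeWhile_append_dropWhile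
    have hpc : ∀ d ∈ rest, c ≤ d := (List.pairwise_cons.mp h).1
    have hp2 : rest.Pairwise (· ≤ ·) := (List.pairwise_cons.mp h).2
    have htail_pw : tail.Pairwise (· ≤ ·) := hp2.sublist (List.dropWhile_sublist _)
    have ht : ∀ d ∈ t, d = c := by
      intro d hd
      have := List.mem_takeWhile_imp hd
      simpa using this
    have hcnot : c ∉ tail := by
      intro hc
      cases htail : tail with
      | nil => rw [htail] at hc; simp at hc
      | cons d ds =>
        have hd : (fun d => d == c) d = false := by
          have := List.head?_dropWhile_not (fun d => d == c) rest
          rw [← htaildef, htail] at this; simpa using this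
        have hdne : d ≠ c := by simpa using hd
        have hdrest : d ∈ rest := by
          have hdt : d ∈ tail := by rw [htail]; simp
          exact (List.dropWhile_sublist _).mem hdt
        have hcd : c ≤ d := hpc d hdrest
        rw [htail] at hc
        rcases List.mem_cons.mp hc with h1 | h1
        · exact hdne h1.symm
        · have hdc : d ≤ c := by
            have h2 := (List.pairwise_cons.mp (htail ▸ htail_pw)).1
            exact h2 c h1
          exact hdne (le_antisymm hdc hcd)
    have hcount_tail : tail.count c = 0 := List.count_eq_zero.mpr hcnot
    have hcount_t : t.count c = t.length := by
      rw [List.count_eq_length]; intro b hb; exact (ht b hb).symm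
    have hcount_l : (c :: rest).count c = t.length + 1 := by
      rw [List.count_cons, ← hsplit, List.count_append, hcount_t, hcount_tail]
      simp
    have hcount_ne : ∀ x, x ≠ c → (c :: rest).count x = tail.count x := by
      intro x hx
      rw [List.count_cons, ← hsplit, List.count_append]
      have htx : t.count x = 0 := by
        rw [List.count_eq_zero]; intro hxt; exact hx (ht x hxt)
      simp [htx, Ne.symm hx]
    have hperm : (PySem.Set.ofList (c :: rest)).Perm (c :: PySem.Set.ofList tail) := by
      apply (List.perm_ext_iff_of_nodup (PySem.Set.nodup_ofList _) _).mpr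
      · intro x
        simp only [PySem.Set.mem_ofList, List.mem_cons, ← hsplit, List.mem_append]
        constructor
        · rintro (rfl | hx | hx)
          · exact Or.inl rfl
          · exact Or.inl (ht x hx)
          · exact Or.inr (by simpa [PySem.Set.mem_ofList] using hx)
        · rintro (rfl | hx)
          · exact Or.inl rfl
          · exact Or.inr (Or.inr (by simpa [PySem.Set.mem_ofList] using hx))
      · exact List.nodup_cons.mpr
          ⟨by simpa [PySem.Set.mem_ofList] using hcnot, PySem.Set.nodup_ofList _⟩
    rw [List.Perm.sum_eq (hperm.map (fun x => contrib x ((c :: rest).count x)))]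
    simp only [List.map_cons, List.sum_cons]
    rw [List.map_congr_left (fun x hx => by
      have hxt : x ∈ tail := by simpa [PySem.Set.mem_ofList] using hx
      have hxc : x ≠ c := fun hh => hcnot (hh ▸ hxt)
      rw [hcount_ne x hxc])]
    rw [← ih htail_pw, hcount_l]
    have hcast : ((t.length + 1 : Nat) : Int) = 1 + (t.length : Int) := by push_cast; ring
    rw [hcast]
    simp [contrib]

-- ===== VERDICT (by name: the statement is the Claim_ definition above) =====
theorem f_spec : Claim_equal_f := by
  intro number _
  unfold Spec_f f_alt
  set s := PySem.Int.toChars number with hs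
  set ss := PySem.List.sorted s (fun c => c) false with hss
  have hperm : ss.Perm s := PySem.List.sorted_perm s (fun c => c) false
  have hpw : ss.Pairwise (· ≤ ·) := by
    have := PySem.List.sorted_pairwise s (fun c => c)
    simpa [← hss] using this
  rw [f_eq_sum, runSum_eq_sum ss hpw]
  have hcount : ∀ x ∈ PySem.Set.ofList ss,
      contrib x ((ss.count x : Nat) : Int) = contrib x ((s.count x : Nat) : Int) := by
    intro x _
    rw [hperm.count_eq]
  rw [List.map_congr_left hcount]
  have hofperm : (PySem.Set.ofList s).Perm (PySem.Set.ofList ss) := by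
    apply (List.perm_ext_iff_of_nodup (PySem.Set.nodup_ofList _) (PySem.Set.nodup_ofList _)).mpr
    intro x
    simp only [PySem.Set.mem_ofList]
    exact hperm.mem_iff.symm
  exact List.Perm.sum_eq (hofperm.map _)
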